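-- pv_equiv track=rewrite | github.com/zjq12333/hermes-agent | tools/fuzzy_match.py | _find_normalized_matches
-- ===== SOURCE A (Python) =====
-- from typing import Tuple, Optional, List, Callable
--
-- def _calculate_line_positions(content_lines: List[str], start_line: int,
--                               end_line: int, content_length: int) -> Tuple[int, int]:
--     """Calculate start and end character positions from line indices.
--
--     Args:
--         content_lines: List of lines (without newlines)
--         start_line: Starting line index (0-based)
--         end_line: Ending line index (exclusive, 0-based)
--         content_length: Total length of the original content string
--
--     Returns:
--         Tuple of (start_pos, end_pos) in the original content
--     """
--     start_pos = sum(len(line) + 1 for line in content_lines[:start_line])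
--     end_pos = sum(len(line) + 1 for line in content_lines[:end_line]) - 1
--     if end_pos >= content_length:
--         end_pos = content_length
--     return start_pos, end_pos
--
-- def _find_normalized_matches(content: str, content_lines: List[str],
--                               content_normalized_lines: List[str],
--                               pattern: str, pattern_normalized: str) -> List[Tuple[int, int]]:
--     """
--     Find matches in normalized content and map back to original positions.
--
--     Args:
--         content: Original content string
--         content_lines: Original content split by lines
--         content_normalized_lines: Normalized content lines
--         pattern: Original pattern
--         pattern_normalized: Normalized pattern
--
--     Returns:
--         List of (start, end) positions in the original content
--     """
--     pattern_norm_lines = pattern_normalized.split('\n')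
--     num_pattern_lines = len(pattern_norm_lines)
--
--     matches = []
--
--     for i in range(len(content_normalized_lines) - num_pattern_lines + 1):
--         # Check if this block matches
--         block = '\n'.join(content_normalized_lines[i:i + num_pattern_lines])
--
--         if block == pattern_normalized:
--             # Found a match - calculate original positions
--             start_pos, end_pos = _calculate_line_positions(
--                 content_lines, i, i + num_pattern_lines, len(content)
--             )
--             matches.append((start_pos, end_pos))
--
--     return matches
-- ===== SOURCE B (Python) =====
-- from typing import List, Tuple
--
-- def _find_normalized_matches(content: str, content_lines: List[str],
--                               content_normalized_lines: List[str],
--                               pattern: str, pattern_normalized: str) -> List[Tuple[int, int]]: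
--     """Scan for candidate rows by comparing the first pattern line, verify the
--     remaining lines only at candidates, and map line indices to char positions
--     via a prefix-sum offset table built once (no per-window string join)."""
--     plines = pattern_normalized.split('\n')
--     k = len(plines)
--     first = plines[0]
--     rest = plines[1:]
--     lines = content_normalized_lines
--     n = len(lines)
--     m = len(content_lines)
--     L = len(content)
--     offsets = [0]
--     acc = 0
--     for line in content_lines:
--         acc += len(line) + 1
--         offsets.append(acc)
--     result = []
--     for i in range(n - k + 1):
--         if lines[i] == first and (not rest or lines[i + 1:i + k] == rest):
--             start = offsets[min(i, m)]
--             end = min(offsets[min(i + k, m)] - 1, L)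
--             result.append((start, end))
--     return result
-- ===== Notes on version B (the rewrite author's own statement) =====
-- stated objective: alternative
-- what changed: B splits the match test into a first-line candidate check plus verification of the remaining lines on a line-list window (no per-window string join), and replaces A's per-match re-summation of line lengths with a prefix-sum offset table built once.
import Mathlib
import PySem

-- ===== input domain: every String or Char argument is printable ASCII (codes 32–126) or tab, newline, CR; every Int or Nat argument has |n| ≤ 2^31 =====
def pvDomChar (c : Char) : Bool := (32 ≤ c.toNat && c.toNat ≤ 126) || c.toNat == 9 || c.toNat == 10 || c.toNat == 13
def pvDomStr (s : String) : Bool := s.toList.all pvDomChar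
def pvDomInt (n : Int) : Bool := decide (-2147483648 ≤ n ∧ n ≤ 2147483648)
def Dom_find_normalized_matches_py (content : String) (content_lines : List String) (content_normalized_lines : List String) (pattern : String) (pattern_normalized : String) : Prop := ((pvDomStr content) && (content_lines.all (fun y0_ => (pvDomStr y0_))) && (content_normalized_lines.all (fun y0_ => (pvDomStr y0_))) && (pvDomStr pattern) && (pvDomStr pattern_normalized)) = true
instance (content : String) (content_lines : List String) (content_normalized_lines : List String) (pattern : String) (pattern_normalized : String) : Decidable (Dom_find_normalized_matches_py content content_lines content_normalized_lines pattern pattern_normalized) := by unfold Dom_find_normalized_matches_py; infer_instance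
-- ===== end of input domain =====

-- B replaces A's per-window string join/compare with a first-line candidate check plus verification
-- of the remaining lines, and A's per-match re-summation with a prefix-sum offset table built once.

-- ===== PORT A =====
-- port of _calculate_line_positions (A-side helper)
def calc_line_positions (content_lines : List String) (start_line : Int) (end_line : Int) (content_length : Int) : Int × Int :=
  let start_pos := ((PySem.List.slice content_lines none (some start_line)).map (fun line => PySem.Str.len line + 1)).sum
  let end_pos := ((PySem.List.slice content_lines none (some end_line)).map (fun line => PySem.Str.len line + 1)).sum - 1
  let end_pos := if end_pos ≥ content_length then content_length else end_pos
  (start_pos, end_pos)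

def find_normalized_matches_py (content : String) (content_lines : List String) (content_normalized_lines : List String) (pattern : String) (pattern_normalized : String) : List (Int × Int) :=
  -- pattern_normalized.split('\n'): separator is the nonempty literal '\n', so Python never raises;
  -- PySem.Chars.splitOn is the sep ≠ "" form of str.split
  let pattern_norm_lines := (PySem.Chars.splitOn pattern_normalized.toList ['\n']).map String.ofList
  let num_pattern_lines : Int := pattern_norm_lines.length
  (PySem.List.pyRange 0 ((content_normalized_lines.length : Int) - num_pattern_lines + 1) 1).foldl
    (fun ms i =>
      let block := PySem.Str.join "\n" (PySem.List.slice content_normalized_lines (some i) (some (i + num_pattern_lines)))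
      if block = pattern_normalized then
        ms ++ [calc_line_positions content_lines i (i + num_pattern_lines) (PySem.Str.len content)]
      else ms) []

-- ===== PORT B =====
def find_normalized_matches_py_alt (content : String) (content_lines : List String) (content_normalized_lines : List String) (pattern : String) (pattern_normalized : String) : List (Int × Int) :=
  let plines := (PySem.Chars.splitOn pattern_normalized.toList ['\n']).map String.ofList
  let k : Int := plines.length
  let first := plines.headI   -- plines[0]; str.split never returns an empty list, so this never raises
  let rest := plines.tail     -- plines[1:]
  let lines := content_normalized_lines
  let n : Int := lines.length
  let m : Int := content_lines.length
  let L := PySem.Str.len content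
  -- offsets = [0]; acc = 0; for line in content_lines: acc += len(line)+1; offsets.append(acc)
  let st := content_lines.foldl (fun (st : List Int × Int) line =>
      let acc := st.2 + PySem.Str.len line + 1
      (st.1 ++ [acc], acc)) ([0], 0)
  let offsets := st.1
  (PySem.List.pyRange 0 (n - k + 1) 1).foldl
    (fun result i =>
      if PySem.List.pyGet? lines i = some first ∧ (rest = [] ∨ PySem.List.slice lines (some (i + 1)) (some (i + k)) = rest) then
        let start := PySem.List.pyGetD offsets (min i m) 0
        let e := min (PySem.List.pyGetD offsets (min (i + k) m) 0 - 1) L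
        result ++ [(start, e)]
      else result) []

-- ===== PRECONDITION & SPEC =====
def Spec_find_normalized_matches_py (content : String) (content_lines : List String) (content_normalized_lines : List String) (pattern : String) (pattern_normalized : String) (out : List (Int × Int)) : Prop := out = find_normalized_matches_py_alt content content_lines content_normalized_lines pattern pattern_normalized
instance (content : String) (content_lines : List String) (content_normalized_lines : List String) (pattern : String) (pattern_normalized : String) (out : List (Int × Int)) : Decidable (Spec_find_normalized_matches_py content content_lines content_normalized_lines pattern pattern_normalized out) := by unfold Spec_find_normalized_matches_py; infer_instance

-- ===== CLAIM (what is proved, stated in full; the proofs are below) =====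
def Claim_equal_find_normalized_matches_py : Prop := ∀ (content : String) (content_lines : List String) (content_normalized_lines : List String) (pattern : String) (pattern_normalized : String), Dom_find_normalized_matches_py content content_lines content_normalized_lines pattern pattern_normalized → Spec_find_normalized_matches_py content content_lines content_normalized_lines pattern pattern_normalized (find_normalized_matches_py content content_lines content_normalized_lines pattern pattern_normalized)

-- ===== LEMMAS AND PROOFS =====
theorem splitOn_go_spec (c : Char) (fuel : Nat) (l cur : List Char) (acc : List (List Char))
    (h : l.length < fuel) :
    PySem.Chars.splitOn.go [c] fuel l cur acc
      = acc.reverse ++ (List.splitOnP (fun a => a == c) l).modifyHead (cur.reverse ++ ·) := by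
  induction fuel generalizing l cur acc with
  | zero => omega
  | succ fuel ih =>
    have hlen : l.length < fuel + 1 := h
    cases l with
    | nil => simp [PySem.Chars.splitOn.go, List.splitOnP_nil]
    | cons a rest =>
      have hr : rest.length < fuel := by simp at hlen; omega
      rw [PySem.Chars.splitOn.go]
      simp only [List.splitOnP_cons]
      by_cases hc : a = c
      · subst hc
        rw [if_pos (by simp [List.isPrefixOf])]
        simp only [List.length_cons, List.length_nil, Nat.zero_add, List.drop_succ_cons, List.drop_zero]
        rw [ih rest [] (cur.reverse :: acc) hr]
        rcases hsp : List.splitOnP (fun x => x == a) rest with _ | ⟨r, rs⟩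
        · exact absurd hsp (List.splitOnP_ne_nil _ _)
        · simp [List.modifyHead]
      · rw [if_neg (by simp [List.isPrefixOf]; intro h'; exact hc h'.symm)]
        rw [ih rest (a :: cur) acc hr]
        rw [if_neg (by simp [hc])]
        rcases hsp : List.splitOnP (fun x => x == c) rest with _ | ⟨r, rs⟩
        · exact absurd hsp (List.splitOnP_ne_nil _ _)
        · simp [List.modifyHead]

theorem chars_splitOn_single (c : Char) (s : List Char) :
    PySem.Chars.splitOn s [c] = List.splitOnP (fun a => a == c) s := by
  rw [PySem.Chars.splitOn, splitOn_go_spec c (s.length + 1) s [] [] (by omega)]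
  rcases hsp : List.splitOnP (fun a => a == c) s with _ | ⟨r, rs⟩
  · exact absurd hsp (List.splitOnP_ne_nil _ _)
  · simp [List.modifyHead]

theorem mem_splitOnP_false {α : Type} (p : α → Bool) (xs : List α) :
    ∀ l ∈ List.splitOnP p xs, ∀ a ∈ l, p a = false := by
  induction xs with
  | nil => simp [List.splitOnP_nil]
  | cons x xs ih =>
    rw [List.splitOnP_cons]
    by_cases hx : p x
    · rw [if_pos hx]
      intro l hl a ha
      rcases List.mem_cons.mp hl with hl | hl
      · simp [hl] at ha
      · exact ih l hl a ha
    · rw [if_neg hx]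
      rcases hsp : List.splitOnP p xs with _ | ⟨r, rs⟩
      · exact absurd hsp (List.splitOnP_ne_nil _ _)
      · intro l hl a ha
        simp only [List.modifyHead] at hl
        rcases List.mem_cons.mp hl with hl | hl
        · subst hl
          rcases List.mem_cons.mp ha with ha | ha
          · simpa [ha] using (Bool.eq_false_iff.mpr hx)
          · exact ih r (by simp [hsp]) a ha
        · exact ih l (by simp [hsp, hl]) a ha

theorem intercalate_cons₂ {α : Type} (s x y : List α) (zs : List (List α)) :
    List.intercalate s (x :: y :: zs) = x ++ s ++ List.intercalate s (y :: zs) := by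
  simp [List.intercalate, List.intersperse]

theorem count_intercalate_single (c : Char) (ws : List (List Char)) (hne : ws ≠ []) :
    ([c].intercalate ws).count c + 1 = (ws.map (List.count c)).sum + ws.length := by
  induction ws with
  | nil => simp at hne
  | cons w ws ih =>
    cases ws with
    | nil => simp [List.intercalate]
    | cons y zs =>
      rw [intercalate_cons₂]
      have := ih (by simp)
      simp only [List.count_append, List.map_cons, List.sum_cons, List.length_cons] at *
      simp only [List.count_singleton, BEq.rfl, if_pos] at *
      omega

theorem intercalate_eq_iff_eq_splitOnP (c : Char) (p : List Char) (ws : List (List Char))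
    (hlen : ws.length = (List.splitOnP (fun a => a == c) p).length) :
    [c].intercalate ws = p ↔ ws = List.splitOnP (fun a => a == c) p := by
  have hsplit : List.splitOn c p = List.splitOnP (fun a => a == c) p := rfl
  constructor
  · intro h
    have hpne : List.splitOnP (fun a => a == c) p ≠ [] := List.splitOnP_ne_nil _ _
    have hwne : ws ≠ [] := by
      intro hw; rw [hw] at hlen; exact hpne (List.eq_nil_of_length_eq_zero hlen.symm)
    have hip : [c].intercalate (List.splitOnP (fun a => a == c) p) = p := by
      rw [← hsplit]; exact List.intercalate_splitOn p c
    have h1 := count_intercalate_single c ws hwne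
    have h2 := count_intercalate_single c (List.splitOnP (fun a => a == c) p) hpne
    rw [hip] at h2
    rw [h] at h1
    have hz : ((List.splitOnP (fun a => a == c) p).map (List.count c)).sum = 0 := by
      rw [List.sum_eq_zero_iff]
      intro x hx
      rcases List.mem_map.mp hx with ⟨l, hl, hxl⟩
      rw [← hxl, List.count_eq_zero]
      intro hc
      have := mem_splitOnP_false _ p l hl c hc
      simp at this
    have hwz : ∀ w ∈ ws, c ∉ w := by
      have : (ws.map (List.count c)).sum = 0 := by omega
      rw [List.sum_eq_zero_iff] at this
      intro w hw
      rw [← List.count_eq_zero (a := c)]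
      exact this _ (List.mem_map.mpr ⟨w, hw, rfl⟩)
    have := List.splitOn_intercalate ws c hwz hwne
    rw [h] at this
    rw [hsplit] at this
    exact this.symm
  · intro h
    rw [h, ← hsplit]
    exact List.intercalate_splitOn p c

theorem offs_spec (ls : List String) (pre : List Int) (a : Int) :
    ls.foldl (fun (st : List Int × Int) line =>
        let acc := st.2 + PySem.Str.len line + 1
        (st.1 ++ [acc], acc)) (pre, a)
      = (pre ++ (List.range ls.length).map
            (fun j => a + ((ls.take (j+1)).map (fun l => PySem.Str.len l + 1)).sum),
         a + (ls.map (fun l => PySem.Str.len l + 1)).sum) := by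
  induction ls generalizing pre a with
  | nil => simp
  | cons l t ih =>
    simp only [List.foldl_cons]
    rw [ih]
    simp only [Prod.mk.injEq]
    refine ⟨?_, by simp; ring⟩
    rw [List.length_cons, List.range_succ_eq_map, List.map_cons, List.map_map]
    rw [List.append_assoc]
    congr 1
    rw [List.singleton_append]
    congr 1
    · simp; ring
    · apply List.map_congr_left
      intro j hj
      simp [List.take_succ_cons]
      ring

theorem offsets_eq_map_range (ls : List String) :
    (ls.foldl (fun (st : List Int × Int) line =>
        let acc := st.2 + PySem.Str.len line + 1
        (st.1 ++ [acc], acc)) ([0], 0)).1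
      = (List.range (ls.length + 1)).map (fun j => ((ls.take j).map (fun l => PySem.Str.len l + 1)).sum) := by
  rw [offs_spec]
  simp only [List.range_succ_eq_map, List.map_cons, List.map_map]
  simp

theorem S_clamp (cl : List String) (j : Nat) :
    ((cl.take (min j cl.length)).map (fun l => PySem.Str.len l + 1)).sum
      = ((cl.take j).map (fun l => PySem.Str.len l + 1)).sum := by
  by_cases h : j ≤ cl.length
  · rw [min_eq_left h]
  · rw [min_eq_right (by omega), List.take_of_length_le (le_refl _), List.take_of_length_le (by omega)]

theorem offsets_lookup (cl : List String) (i : Int) (hi : 0 ≤ i) :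
    PySem.List.pyGetD
      ((cl.foldl (fun (st : List Int × Int) line =>
        let acc := st.2 + PySem.Str.len line + 1
        (st.1 ++ [acc], acc)) ([0], 0)).1) (min i (cl.length : Int)) 0
      = ((cl.take i.toNat).map (fun l => PySem.Str.len l + 1)).sum := by
  rw [offsets_eq_map_range]
  have h0 : (0:Int) ≤ min i (cl.length : Int) := by omega
  rw [PySem.List.pyGetD_of_nonneg _ _ h0]
  have ht : (min i (cl.length:Int)).toNat = min i.toNat cl.length := by omega
  rw [ht, PySem.List.getD_map_range _ _ _ _ (by omega)]
  exact S_clamp cl i.toNat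

-- ===== VERDICT (by name: the statement is the Claim_ definition above) =====
theorem find_normalized_matches_py_spec : Claim_equal_find_normalized_matches_py := by
  intro content cl cnl pat pn _dom
  unfold Spec_find_normalized_matches_py
  unfold find_normalized_matches_py find_normalized_matches_py_alt
  apply PySem.List.foldl_congr_mem
  intro acc i hi
  rw [PySem.List.mem_pyRange_one] at hi
  obtain ⟨hi0, hiN⟩ := hi
  set plines := (PySem.Chars.splitOn pn.toList ['\n']).map String.ofList with hpl
  set k : Int := (plines.length : Int) with hk
  set ws := PySem.List.slice cnl (some i) (some (i + k)) with hws
  -- window length = k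
  have hksp : plines.length = (List.splitOnP (fun a => a == '\n') pn.toList).length := by
    rw [hpl, List.length_map, chars_splitOn_single]
  have hkpos : 0 < plines.length := by
    rcases h : List.splitOnP (fun a => a == '\n') pn.toList with _ | ⟨r, rs⟩
    · exact absurd h (List.splitOnP_ne_nil _ _)
    · rw [hksp, h]; simp
  have hwlen : ws.length = plines.length := by
    rw [hws, PySem.List.length_slice]
    simp only [PySem.List.clampIdx]
    rw [if_neg (by omega), if_neg (by omega)]
    omega
  -- condition equivalence
  have hcond : (PySem.Str.join "\n" ws = pn) ↔ (ws = plines) := by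
    rw [← String.toList_inj, PySem.Str.toList_join]
    have hsep : ("\n" : String).toList = ['\n'] := by decide
    rw [hsep]
    have : PySem.Chars.join ['\n'] (ws.map String.toList) = ['\n'].intercalate (ws.map String.toList) := rfl
    rw [this]
    rw [intercalate_eq_iff_eq_splitOnP '\n' pn.toList (ws.map String.toList)
      (by rw [List.length_map, hwlen, hksp])]
    constructor
    · intro h
      have : ws.map String.toList = plines.map String.toList := by
        rw [h, hpl, List.map_map]
        simp [Function.comp_def, String.toList_ofList, chars_splitOn_single]
      exact List.map_injective_iff.mpr (fun a b hab => String.toList_inj.mp hab) this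
    · intro h
      rw [h, hpl, List.map_map]
      simp [Function.comp_def, String.toList_ofList, chars_splitOn_single]
  -- candidate/verify form of the window comparison
  have hcond2 : (ws = plines) ↔
      (PySem.List.pyGet? cnl i = some plines.headI ∧
        (plines.tail = [] ∨ PySem.List.slice cnl (some (i + 1)) (some (i + k)) = plines.tail)) := by
    rcases hplc : plines with _ | ⟨first, rest⟩
    · rw [hplc] at hkpos; simp at hkpos
    · have hkr : k = (rest.length : Int) + 1 := by rw [hk, hplc]; simp
      have hj : i.toNat < cnl.length := by omega
      have hws' : ws = cnl[i.toNat] :: (cnl.drop (i.toNat + 1)).take rest.length := by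
        rw [hws, PySem.List.slice_toNat cnl hi0 (by omega)]
        have : (i + k).toNat - i.toNat = rest.length + 1 := by omega
        rw [this, List.drop_eq_getElem_cons hj, List.take_succ_cons]
      have hrs : PySem.List.slice cnl (some (i + 1)) (some (i + k))
          = (cnl.drop (i.toNat + 1)).take rest.length := by
        rw [PySem.List.slice_toNat cnl (by omega) (by omega)]
        have h1 : (i + 1).toNat = i.toNat + 1 := by omega
        have h2 : (i + k).toNat - (i.toNat + 1) = rest.length := by omega
        rw [h1, h2]
      rw [hws', PySem.List.pyGet?_of_nonneg _ hi0, List.getElem?_eq_getElem hj, hrs]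
      simp only [List.headI_cons, List.tail_cons, List.cons.injEq, Option.some.injEq]
      constructor
      · rintro ⟨h1, h2⟩; exact ⟨h1, Or.inr h2⟩
      · rintro ⟨h1, h2 | h2⟩
        · refine ⟨h1, ?_⟩
          rw [h2]
          simp
        · exact ⟨h1, h2⟩
  -- position equality
  have hstart : ((PySem.List.slice cl none (some i)).map (fun line => PySem.Str.len line + 1)).sum
      = PySem.List.pyGetD ((cl.foldl (fun (st : List Int × Int) line =>
          let acc := st.2 + PySem.Str.len line + 1
          (st.1 ++ [acc], acc)) ([0], 0)).1) (min i (cl.length : Int)) 0 := by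
    rw [offsets_lookup cl i hi0, PySem.List.slice_to _ hi0]
  have hend : ((PySem.List.slice cl none (some (i + k))).map (fun line => PySem.Str.len line + 1)).sum
      = PySem.List.pyGetD ((cl.foldl (fun (st : List Int × Int) line =>
          let acc := st.2 + PySem.Str.len line + 1
          (st.1 ++ [acc], acc)) ([0], 0)).1) (min (i + k) (cl.length : Int)) 0 := by
    rw [offsets_lookup cl (i + k) (by omega), PySem.List.slice_to _ (by omega)]
  have hpair : calc_line_positions cl i (i + k) (PySem.Str.len content)
      = (PySem.List.pyGetD ((cl.foldl (fun (st : List Int × Int) line =>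
            let acc := st.2 + PySem.Str.len line + 1
            (st.1 ++ [acc], acc)) ([0], 0)).1) (min i (cl.length : Int)) 0,
         min (PySem.List.pyGetD ((cl.foldl (fun (st : List Int × Int) line =>
            let acc := st.2 + PySem.Str.len line + 1
            (st.1 ++ [acc], acc)) ([0], 0)).1) (min (i + k) (cl.length : Int)) 0 - 1) (PySem.Str.len content)) := by
    unfold calc_line_positions
    dsimp only
    rw [← hstart, ← hend]
    simp only [Prod.mk.injEq, true_and]
    split_ifs with h
    · omega
    · omega
  exact if_congr (hcond.trans hcond2) (by rw [hpair]) rfl
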